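-- pv_equiv track=rewrite | github.com/sfmth/openroad_scripts | compressor.py | compute_unique_prefixes_for_category
-- ===== SOURCE A (Python) =====
-- SEPS = {'.', '/'}
--
-- def sep_prefixes(name):
--     """All prefixes ending exactly at '.' or '/' (short → long)."""
--     out = []
--     for i, ch in enumerate(name):
--         if ch in SEPS:
--             out.append(name[:i+1])
--     return out
--
-- def compute_unique_prefixes_for_category(cat, names, pref_to_cats):
--     """
--     For each name, find the SHORTEST prefix-at-separator unique to `cat`.
--     Then reduce the set (drop any prefix covered by a shorter already chosen).
--     Returns (prefixes:set[str], covered_names:set[str])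
--     """
--     candidates = []  # (prefix, len)
--     for nm in names:
--         uniq = None
--         for p in sep_prefixes(nm):
--             if pref_to_cats[p] == {cat}:
--                 uniq = p
--                 break  # shortest unique
--         if uniq:
--             candidates.append(uniq)
--
--     # dedup and minimize coverage: keep shortest that are not subsumed by another kept prefix
--     candidates = sorted(set(candidates), key=len)
--     kept = []
--     for p in candidates:
--         if not any(p.startswith(k) for k in kept):
--             kept.append(p)
--
--     # compute coverage
--     covered = set()
--     for nm in names:
--         if any(nm.startswith(k) for k in kept):
--             covered.add(nm)
--
--     return set(kept), covered
-- ===== SOURCE B (Python) =====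
-- SEPS = {'.', '/'}
--
-- def compute_unique_prefixes_for_category(cat, names, pref_to_cats):
--     target = {cat}
--     # phase 1: shortest separator-prefix unique to `cat`, found by a direct
--     # character scan (no intermediate list of all prefixes)
--     candidates = []
--     for nm in names:
--         for i, ch in enumerate(nm):
--             if ch in SEPS:
--                 p = nm[:i + 1]
--                 if pref_to_cats[p] == target:
--                     candidates.append(p)
--                     break
--     cset = set(candidates)
--     # phase 2: a prefix survives iff none of its own proper separator-prefixes
--     # is itself a candidate (one membership pass instead of an all-pairs scan)
--     kept = [p for p in sorted(cset, key=len)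
--             if not any(p[:i + 1] in cset for i in range(len(p) - 1) if p[i] in SEPS)]
--     # phase 3: coverage
--     covered = {nm for nm in names if any(nm.startswith(k) for k in kept)}
--     return set(kept), covered
-- ===== Notes on version B (the rewrite author's own statement) =====
-- stated objective: alternative
-- what changed: Phase 1 finds each name's shortest unique prefix by scanning characters directly instead of materializing the full list of separator prefixes first, and the minimize step replaces A's all-pairs `p.startswith(k)` scan over the kept list by a single test of whether any of p's own proper separator-prefixes lies in the candidate hash set.
import Mathlib
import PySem

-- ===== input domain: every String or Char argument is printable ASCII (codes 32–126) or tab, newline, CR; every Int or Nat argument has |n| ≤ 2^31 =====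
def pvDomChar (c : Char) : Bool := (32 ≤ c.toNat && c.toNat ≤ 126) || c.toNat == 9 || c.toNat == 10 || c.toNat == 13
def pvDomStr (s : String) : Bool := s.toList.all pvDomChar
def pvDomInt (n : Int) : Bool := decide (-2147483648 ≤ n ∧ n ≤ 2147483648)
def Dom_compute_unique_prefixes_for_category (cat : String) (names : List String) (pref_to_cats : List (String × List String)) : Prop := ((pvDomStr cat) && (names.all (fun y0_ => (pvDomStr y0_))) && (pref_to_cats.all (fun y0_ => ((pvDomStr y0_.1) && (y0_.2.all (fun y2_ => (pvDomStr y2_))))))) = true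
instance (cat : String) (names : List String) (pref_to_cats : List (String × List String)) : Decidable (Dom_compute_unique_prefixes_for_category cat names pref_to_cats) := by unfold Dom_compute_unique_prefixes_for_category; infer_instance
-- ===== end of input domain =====

-- B restructures, same results: phase 1 scans characters directly (no materialized prefix
-- list), and the minimize phase tests each candidate's own proper separator-prefixes for
-- membership in the candidate set instead of A's all-pairs startswith scan over `kept`.

-- shared leaf helpers: semantics of the Python primitives both versions use
def pvIsSep (c : Char) : Bool := c = '.' || c = '/'          -- `ch in SEPS`
def pvEqCatSet (v : List String) (cat : String) : Bool :=    -- `v == {cat}` on set values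
  PySem.Set.equal (PySem.Set.ofList v) (PySem.Set.ofList [cat])

-- ===== PORT A =====
def sep_prefixes (name : String) : List String :=
  (PySem.List.enumerate name.toList).foldl
    (fun out ic =>
      if pvIsSep ic.2 then out ++ [PySem.Str.slice name none (some (ic.1 + 1))] else out) []

-- the inner `for p in sep_prefixes(nm): … break` loop
def pvFindUniq (cat : String) (d : PySem.Dict String (List String)) : List String → Option String
  | [] => none
  | p :: rest => if pvEqCatSet (d.getD p []) cat then some p else pvFindUniq cat d rest

-- the `for nm in names:` candidate loop (`if uniq:` — a found prefix is nonempty, hence truthy)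
def pvCandidatesA (cat : String) (d : PySem.Dict String (List String)) (names : List String) : List String :=
  names.foldl (fun acc nm =>
    match pvFindUniq cat d (sep_prefixes nm) with
    | some p => acc ++ [p]
    | none => acc) []

-- `candidates = sorted(set(candidates), key=len)` followed by the greedy kept loop
def pvKeptA (cands : List String) : List String :=
  (PySem.List.sorted (PySem.Set.ofList cands) PySem.Str.len).foldl
    (fun kept p => if kept.any (fun k => PySem.Str.startswith p k) then kept else kept ++ [p]) []

def compute_unique_prefixes_for_category (cat : String) (names : List String) (pref_to_cats : List (String × List String)) : List String × List String :=
  let d := PySem.Dict.mk pref_to_cats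
  let kept := pvKeptA (pvCandidatesA cat d names)
  let covered := names.foldl (fun cov nm =>
    if kept.any (fun k => PySem.Str.startswith nm k) then PySem.Set.add cov nm else cov) []
  (PySem.Set.ofList kept, covered)

-- ===== PORT B =====
-- `for i, ch in enumerate(nm): if ch in SEPS: … break` — direct character scan
def pvScanUniq (cat : String) (d : PySem.Dict String (List String)) (nm : String) : List (Int × Char) → Option String
  | [] => none
  | ic :: rest =>
    if pvIsSep ic.2 then
      let p := PySem.Str.slice nm none (some (ic.1 + 1))
      if pvEqCatSet (d.getD p []) cat then some p else pvScanUniq cat d nm rest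
    else pvScanUniq cat d nm rest

def pvCandidatesB (cat : String) (d : PySem.Dict String (List String)) (names : List String) : List String :=
  names.foldl (fun acc nm =>
    match pvScanUniq cat d nm (PySem.List.enumerate nm.toList) with
    | some p => acc ++ [p]
    | none => acc) []

-- `[p[:i+1] for i in range(len(p)-1) if p[i] in SEPS]`
def proper_sep_prefixes (p : String) : List String :=
  ((PySem.List.pyRange 0 (PySem.Str.len p - 1) 1).filter
      (fun i => (PySem.Str.pyGet? p i).any pvIsSep)).map
    (fun i => PySem.Str.slice p none (some (i + 1)))

-- `[p for p in sorted(cset, key=len) if not any(… in cset …)]`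
def pvKeptB (cands : List String) : List String :=
  (PySem.List.sorted (PySem.Set.ofList cands) PySem.Str.len).filter
    (fun p => !(proper_sep_prefixes p).any (fun q => PySem.Set.contains (PySem.Set.ofList cands) q))

def compute_unique_prefixes_for_category_alt (cat : String) (names : List String) (pref_to_cats : List (String × List String)) : List String × List String :=
  let d := PySem.Dict.mk pref_to_cats
  let kept := pvKeptB (pvCandidatesB cat d names)
  let covered := PySem.Set.ofList (names.filter (fun nm => kept.any (fun k => PySem.Str.startswith nm k)))
  (PySem.Set.ofList kept, covered)

-- ===== PRECONDITION & SPEC =====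
-- Pre_ excludes exactly the inputs on which the Python raises KeyError: some name has a
-- separator-prefix that is missing from pref_to_cats and is reached, i.e. no strictly
-- earlier separator-prefix of that name maps to exactly {cat} (the loop breaks there).
def Pre_compute_unique_prefixes_for_category (cat : String) (names : List String) (pref_to_cats : List (String × List String)) : Prop :=
  ∀ nm ∈ names, ∀ k : Nat, k < nm.toList.length → pvIsSep (nm.toList.getD k ' ') = true →
    (PySem.Dict.mk pref_to_cats).contains (String.ofList (nm.toList.take (k + 1))) = true ∨
    ∃ j : Nat, j < k ∧ pvIsSep (nm.toList.getD j ' ') = true ∧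
      pvEqCatSet ((PySem.Dict.mk pref_to_cats).getD (String.ofList (nm.toList.take (j + 1))) []) cat = true

instance (cat : String) (names : List String) (pref_to_cats : List (String × List String)) : Decidable (Pre_compute_unique_prefixes_for_category cat names pref_to_cats) := by unfold Pre_compute_unique_prefixes_for_category; infer_instance

def pvWitness_compute_unique_prefixes_for_category : String × List String × (List (String × List String)) :=
  ("c", (["a.x", "b/y"], [("a.", ["c"]), ("b/", ["c", "d"])]))

def Spec_compute_unique_prefixes_for_category (cat : String) (names : List String) (pref_to_cats : List (String × List String)) (out : List String × List String) : Prop := out = compute_unique_prefixes_for_category_alt cat names pref_to_cats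
instance (cat : String) (names : List String) (pref_to_cats : List (String × List String)) (out : List String × List String) : Decidable (Spec_compute_unique_prefixes_for_category cat names pref_to_cats out) := by unfold Spec_compute_unique_prefixes_for_category; infer_instance

-- ===== CLAIM (what is proved, stated in full; the proofs are below) =====
def Claim_equal_compute_unique_prefixes_for_category : Prop := ∀ (cat : String) (names : List String) (pref_to_cats : List (String × List String)), Dom_compute_unique_prefixes_for_category cat names pref_to_cats → Pre_compute_unique_prefixes_for_category cat names pref_to_cats → Spec_compute_unique_prefixes_for_category cat names pref_to_cats (compute_unique_prefixes_for_category cat names pref_to_cats)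

-- ===== LEMMAS AND PROOFS =====

-- the witness satisfies Dom and Pre
theorem pvWitness_ok :
    Dom_compute_unique_prefixes_for_category pvWitness_compute_unique_prefixes_for_category.1 pvWitness_compute_unique_prefixes_for_category.2.1 pvWitness_compute_unique_prefixes_for_category.2.2 ∧
    Pre_compute_unique_prefixes_for_category pvWitness_compute_unique_prefixes_for_category.1 pvWitness_compute_unique_prefixes_for_category.2.1 pvWitness_compute_unique_prefixes_for_category.2.2 :=
  ⟨by decide, by decide⟩

-- "p ends with a separator character"
def pvEndsSep (p : String) : Prop := ∃ cs c, p.toList = cs ++ [c] ∧ pvIsSep c = true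

theorem pv_slice_toList (nm : String) (k : Nat) :
    (PySem.Str.slice nm none (some ((k : Int) + 1))).toList = nm.toList.take (k + 1) := by
  rw [PySem.Str.toList_slice]
  show PySem.List.slice _ _ _ = _
  rw [PySem.List.slice_to _ (by positivity), show ((k : Int) + 1).toNat = k + 1 from by omega]

theorem pv_mem_enumerate {α : Type} (xs : List α) (s i : Int) (c : α)
    (h : (i, c) ∈ PySem.List.enumerate xs s) :
    ∃ k : Nat, k < xs.length ∧ i = s + k ∧ xs[k]? = some c := by
  induction xs generalizing s with
  | nil => simp [PySem.List.enumerate_nil] at h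
  | cons x xs ih =>
    rw [PySem.List.enumerate_cons] at h
    rcases List.mem_cons.mp h with h | h
    · simp only [Prod.mk.injEq] at h
      exact ⟨0, by simp, by omega, by simp [h.2]⟩
    · obtain ⟨k, hk, hi, hg⟩ := ih (s + 1) h
      exact ⟨k + 1, by simpa using Nat.succ_lt_succ hk, by omega, by simpa using hg⟩

theorem pv_scanUniq_some (cat : String) (d : PySem.Dict String (List String)) (nm : String) :
    ∀ l p, pvScanUniq cat d nm l = some p →
      ∃ ic ∈ l, pvIsSep ic.2 = true ∧ p = PySem.Str.slice nm none (some (ic.1 + 1)) := by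
  intro l
  induction l with
  | nil => intro p h; simp [pvScanUniq] at h
  | cons ic rest ih =>
    intro p h
    by_cases hs : pvIsSep ic.2
    · simp only [pvScanUniq, hs, if_true] at h
      by_cases he : pvEqCatSet (d.getD (PySem.Str.slice nm none (some (ic.1 + 1))) []) cat
      · simp only [he, if_true, Option.some.injEq] at h
        exact ⟨ic, List.mem_cons_self, hs, h.symm⟩
      · simp only [he] at h
        obtain ⟨jc, hjc, h1, h2⟩ := ih p h
        exact ⟨jc, List.mem_cons_of_mem _ hjc, h1, h2⟩
    · simp only [pvScanUniq, hs] at h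
      obtain ⟨jc, hjc, h1, h2⟩ := ih p h
      exact ⟨jc, List.mem_cons_of_mem _ hjc, h1, h2⟩

theorem pv_scanUniq_endsSep (cat : String) (d : PySem.Dict String (List String)) (nm p : String)
    (h : pvScanUniq cat d nm (PySem.List.enumerate nm.toList) = some p) : pvEndsSep p := by
  obtain ⟨ic, hmem, hs, hp⟩ := pv_scanUniq_some cat d nm _ p h
  obtain ⟨k, hk, hi, hg⟩ := pv_mem_enumerate nm.toList 0 ic.1 ic.2 (by simpa using hmem)
  have hi' : ic.1 = (k : Int) := by omega
  have hpl : p.toList = nm.toList.take (k + 1) := by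
    rw [hp, hi', pv_slice_toList]
  refine ⟨nm.toList.take k, ic.2, ?_, hs⟩
  rw [hpl, List.take_add_one, hg]
  rfl

-- phase 1 of A equals phase 1 of B
theorem pv_sep_prefixes_eq (nm : String) :
    sep_prefixes nm = ((PySem.List.enumerate nm.toList).filter (fun ic => pvIsSep ic.2)).map
      (fun ic => PySem.Str.slice nm none (some (ic.1 + 1))) := by
  unfold sep_prefixes
  simpa using PySem.List.foldl_append_if (fun (ic : Int × Char) => pvIsSep ic.2)
    (fun ic => PySem.Str.slice nm none (some (ic.1 + 1))) (PySem.List.enumerate nm.toList) []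

theorem pv_findUniq_eq_scan (cat : String) (d : PySem.Dict String (List String)) (nm : String) :
    ∀ l : List (Int × Char),
      pvFindUniq cat d ((l.filter (fun ic => pvIsSep ic.2)).map
        (fun ic => PySem.Str.slice nm none (some (ic.1 + 1)))) = pvScanUniq cat d nm l := by
  intro l
  induction l with
  | nil => rfl
  | cons ic rest ih =>
    by_cases hs : pvIsSep ic.2
    · simp only [List.filter_cons, hs, if_true, List.map_cons, pvFindUniq, pvScanUniq]
      split <;> simp [ih]
    · simp only [List.filter_cons, hs, pvScanUniq]
      simpa [hs] using ih

theorem pv_candidates_eq (cat : String) (d : PySem.Dict String (List String)) (names : List String) :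
    pvCandidatesA cat d names = pvCandidatesB cat d names := by
  unfold pvCandidatesA pvCandidatesB
  have hf : (fun (acc : List String) nm =>
      match pvFindUniq cat d (sep_prefixes nm) with
      | some p => acc ++ [p]
      | none => acc) = (fun acc nm =>
      match pvScanUniq cat d nm (PySem.List.enumerate nm.toList) with
      | some p => acc ++ [p]
      | none => acc) := by
    funext acc nm
    rw [pv_sep_prefixes_eq, pv_findUniq_eq_scan]
  rw [hf]

theorem pv_candidatesB_endsSep (cat : String) (d : PySem.Dict String (List String)) (names : List String) :
    ∀ p ∈ pvCandidatesB cat d names, pvEndsSep p := by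
  unfold pvCandidatesB
  suffices h : ∀ (acc : List String), (∀ p ∈ acc, pvEndsSep p) →
      ∀ p ∈ names.foldl (fun acc nm =>
        match pvScanUniq cat d nm (PySem.List.enumerate nm.toList) with
        | some p => acc ++ [p]
        | none => acc) acc, pvEndsSep p by
    exact h [] (by simp)
  induction names with
  | nil => intro acc hacc; simpa using hacc
  | cons nm names ih =>
    intro acc hacc p hp
    simp only [List.foldl_cons] at hp
    cases hscan : pvScanUniq cat d nm (PySem.List.enumerate nm.toList) with
    | none => rw [hscan] at hp; exact ih acc hacc p hp
    | some q =>
      rw [hscan] at hp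
      refine ih (acc ++ [q]) ?_ p hp
      intro r hr
      rcases List.mem_append.mp hr with hr | hr
      · exact hacc r hr
      · simp only [List.mem_singleton] at hr
        subst hr
        exact pv_scanUniq_endsSep cat d nm r hscan

-- membership in proper_sep_prefixes, characterized at the character-list level
theorem pv_mem_proper_iff (p q : String) :
    q ∈ proper_sep_prefixes p ↔
      ∃ k : Nat, k + 1 < p.toList.length ∧ (p.toList[k]?).any pvIsSep = true ∧
        q = PySem.Str.slice p none (some ((k : Int) + 1)) := by
  unfold proper_sep_prefixes
  simp only [List.mem_map, List.mem_filter, PySem.List.mem_pyRange_one]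
  constructor
  · rintro ⟨i, ⟨⟨hi0, hilt⟩, hsep⟩, rfl⟩
    rw [PySem.Str.len_eq] at hilt
    refine ⟨i.toNat, by omega, ?_, by rw [show ((i.toNat : Nat) : Int) = i from by omega]⟩
    rw [PySem.Str.pyGet?_eq] at hsep
    have : PySem.Chars.pyGet? p.toList i = p.toList[i.toNat]? := by
      show PySem.List.pyGet? _ _ = _
      conv_lhs => rw [show i = ((i.toNat : Nat) : Int) by omega]
      rw [PySem.List.pyGet?_natCast]
    rwa [this] at hsep
  · rintro ⟨k, hk, hsep, rfl⟩
    refine ⟨(k : Int), ⟨⟨by positivity, by rw [PySem.Str.len_eq]; omega⟩, ?_⟩, rfl⟩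
    rw [PySem.Str.pyGet?_eq]
    have : PySem.Chars.pyGet? p.toList (k : Int) = p.toList[k]? := by
      show PySem.List.pyGet? _ _ = _
      rw [PySem.List.pyGet?_natCast]
    rw [this]; exact hsep

theorem pv_proper_spec (p q : String) (h : q ∈ proper_sep_prefixes p) :
    q.toList <+: p.toList ∧ q.toList.length < p.toList.length ∧ pvEndsSep q := by
  obtain ⟨k, hk, hsep, rfl⟩ := (pv_mem_proper_iff p q).mp h
  have hlist : (PySem.Str.slice p none (some ((k : Int) + 1))).toList = p.toList.take (k + 1) :=
    pv_slice_toList p k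
  cases hget : p.toList[k]? with
  | none => rw [hget] at hsep; simp at hsep
  | some c =>
    rw [hget] at hsep
    refine ⟨?_, ?_, ?_⟩
    · rw [hlist]; exact List.take_prefix _ _
    · rw [hlist, List.length_take]; omega
    · refine ⟨p.toList.take k, c, ?_, by simpa using hsep⟩
      rw [hlist, List.take_add_one, hget]
      rfl

theorem pv_prefix_mem_proper (p q : String) (hE : pvEndsSep q)
    (hpre : q.toList <+: p.toList) (hne : q ≠ p) : q ∈ proper_sep_prefixes p := by
  obtain ⟨cs, c, hq, hc⟩ := hE
  have hlen : q.toList.length ≤ p.toList.length := hpre.length_le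
  have hlt : q.toList.length < p.toList.length := by
    rcases lt_or_eq_of_le hlen with h | h
    · exact h
    · exfalso
      apply hne
      apply String.toList_inj.mp
      exact List.IsPrefix.eq_of_length hpre h
  have hpos : 0 < q.toList.length := by rw [hq]; simp
  refine (pv_mem_proper_iff p q).mpr ⟨q.toList.length - 1, by omega, ?_, ?_⟩
  · have hget : q.toList[q.toList.length - 1]? = some c := by
      rw [hq]
      simp
    have heq : p.toList[q.toList.length - 1]? = q.toList[q.toList.length - 1]? := by
      obtain ⟨t, ht⟩ := hpre
      rw [← ht, List.getElem?_append_left (by omega)]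
    rw [heq, hget]
    simpa using hc
  · apply String.toList_inj.mp
    rw [pv_slice_toList, Nat.sub_add_cancel hpos]
    exact List.prefix_iff_eq_take.mp hpre

-- B's boolean test for a candidate p
def pvGood (cands : List String) (p : String) : Bool :=
  !(proper_sep_prefixes p).any (fun q => PySem.Set.contains (PySem.Set.ofList cands) q)

theorem pv_good_false_iff (cands : List String) (p : String) :
    pvGood cands p = false ↔ ∃ q ∈ cands, q ∈ proper_sep_prefixes p := by
  unfold pvGood
  simp only [Bool.not_eq_false', List.any_eq_true]
  constructor
  · rintro ⟨q, hq, hc⟩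
    refine ⟨q, ?_, hq⟩
    have : q ∈ PySem.Set.ofList cands := by
      simpa [PySem.Set.contains] using hc
    exact (PySem.Set.mem_ofList cands q).mp this
  · rintro ⟨q, hq, hprop⟩
    refine ⟨q, hprop, ?_⟩
    simp [PySem.Set.contains, (PySem.Set.mem_ofList cands q).mpr hq]

-- if p has a proper candidate separator-prefix, it has a *good* one
theorem pv_exists_good_prefix (cands : List String) :
    ∀ n (p : String), p.toList.length ≤ n →
      (∃ q ∈ cands, q ∈ proper_sep_prefixes p) →
      ∃ q₀ ∈ cands, q₀ ∈ proper_sep_prefixes p ∧ pvGood cands q₀ = true := by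
  intro n
  induction n with
  | zero =>
    rintro p hlen ⟨q, _, hprop⟩
    obtain ⟨_, hlt, _⟩ := pv_proper_spec p q hprop
    omega
  | succ n ih =>
    rintro p hlen ⟨q, hq, hprop⟩
    cases hgood : pvGood cands q with
    | true => exact ⟨q, hq, hprop, hgood⟩
    | false =>
      obtain ⟨hpre, hlt, _⟩ := pv_proper_spec p q hprop
      obtain ⟨q₀, hq₀, hprop₀, hgood₀⟩ := ih q (by omega) ((pv_good_false_iff cands q).mp hgood)
      obtain ⟨hpre₀, hlt₀, hE₀⟩ := pv_proper_spec q q₀ hprop₀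
      refine ⟨q₀, hq₀, ?_, hgood₀⟩
      apply pv_prefix_mem_proper p q₀ hE₀ (hpre₀.trans hpre)
      intro hcontra
      rw [hcontra] at hlt₀
      omega

-- the greedy kept loop of A computes exactly B's filter
theorem pv_kept_eq (cands : List String) (hE : ∀ p ∈ cands, pvEndsSep p) :
    pvKeptA cands = pvKeptB cands := by
  unfold pvKeptA pvKeptB
  set L := PySem.List.sorted (PySem.Set.ofList cands) PySem.Str.len with hL
  have hmemL : ∀ x, x ∈ L ↔ x ∈ cands := by
    intro x
    rw [hL, PySem.List.mem_sorted, PySem.Set.mem_ofList]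
  have hnd : L.Nodup := ((PySem.List.sorted_perm (PySem.Set.ofList cands) PySem.Str.len false)).symm.nodup (PySem.Set.nodup_ofList cands)
  have hpair : L.Pairwise (fun a b => a.toList.length ≤ b.toList.length) := by
    have := PySem.List.sorted_pairwise (PySem.Set.ofList cands) PySem.Str.len
    refine this.imp ?_
    intro a b hab
    rw [PySem.Str.len_eq, PySem.Str.len_eq] at hab
    exact_mod_cast hab
  have hchange : (fun p => !(proper_sep_prefixes p).any (fun q => PySem.Set.contains (PySem.Set.ofList cands) q)) = pvGood cands := by
    funext p; rfl
  rw [hchange]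
  suffices h : ∀ todo done : List String, L = done ++ todo →
      todo.foldl (fun kept p => if kept.any (fun k => PySem.Str.startswith p k) then kept else kept ++ [p]) (done.filter (pvGood cands)) = (done ++ todo).filter (pvGood cands) by
    simpa using h L [] rfl
  intro todo
  induction todo with
  | nil => intro done hdone; simp
  | cons p rest ih =>
    intro done hdone
    have hmem_p : p ∈ L := by rw [hdone]; simp
    have hany : (done.filter (pvGood cands)).any (fun k => PySem.Str.startswith p k) = !(pvGood cands p) := by
      cases hgood : pvGood cands p with
      | false =>
        -- there is a good proper candidate prefix of p; it is shorter, hence in `done`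
        obtain ⟨q₀, hq₀c, hprop₀, hgood₀⟩ :=
          pv_exists_good_prefix cands p.toList.length p le_rfl ((pv_good_false_iff cands p).mp hgood)
        obtain ⟨hpre₀, hlt₀, _⟩ := pv_proper_spec p q₀ hprop₀
        have hq₀L : q₀ ∈ L := (hmemL q₀).mpr hq₀c
        have hq₀done : q₀ ∈ done := by
          rw [hdone] at hq₀L
          rcases List.mem_append.mp hq₀L with h | h
          · exact h
          · exfalso
            rcases List.mem_cons.mp h with h | h
            · rw [h] at hlt₀; omega
            · -- q₀ after p in the length-sorted list: p.len ≤ q₀.len, contradiction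
              have := (List.pairwise_append.mp (hdone ▸ hpair)).2.1
              have := (List.pairwise_cons.mp this).1 q₀ h
              omega
        simp only [Bool.not_false, List.any_eq_true]
        exact ⟨q₀, List.mem_filter.mpr ⟨hq₀done, hgood₀⟩,
          (PySem.Chars.startswith_iff p.toList q₀.toList).mpr hpre₀ ▸ (PySem.Str.startswith_eq p q₀) ▸ rfl⟩
      | true =>
        simp only [Bool.not_true, List.any_eq_false]
        intro k hk
        have hkdone : k ∈ done := (List.mem_filter.mp hk).1
        have hkc : k ∈ cands := (hmemL k).mp (by rw [hdone]; simp [hkdone])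
        have hkne : k ≠ p := by
          intro hcontra
          have hpnd : p ∉ done := by
            rw [hdone] at hnd
            have := (List.disjoint_of_nodup_append hnd)
            intro hp
            exact this hp (by simp)
          rw [hcontra] at hkdone
          exact hpnd hkdone
        intro hsw
        have hpre : k.toList <+: p.toList := by
          rw [PySem.Str.startswith_eq] at hsw
          exact (PySem.Chars.startswith_iff p.toList k.toList).mp hsw
        have : pvGood cands p = false :=
          (pv_good_false_iff cands p).mpr ⟨k, hkc, pv_prefix_mem_proper p k (hE k hkc) hpre hkne⟩
        rw [this] at hgood
        exact absurd hgood (by simp)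
    rw [List.foldl_cons, hany]
    cases hgood : pvGood cands p with
    | false =>
      rw [if_pos (by simp)]
      have hfe : done.filter (pvGood cands) = (done ++ [p]).filter (pvGood cands) := by
        simp [List.filter_append, hgood]
      rw [hfe, ih (done ++ [p]) (by simpa using hdone)]
      simp [List.filter_append, hgood]
    | true =>
      rw [if_neg (by simp)]
      have hfe : done.filter (pvGood cands) ++ [p] = (done ++ [p]).filter (pvGood cands) := by
        simp [List.filter_append, hgood]
      rw [hfe, ih (done ++ [p]) (by simpa using hdone)]
      simp [List.filter_append, hgood]

-- A's covered-set loop is B's filter comprehension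
theorem pv_covered_eq (names : List String) (c : String → Bool) :
    names.foldl (fun cov nm => if c nm then PySem.Set.add cov nm else cov) [] =
      PySem.Set.ofList (names.filter c) := by
  rw [PySem.Set.ofList_eq_foldl]
  suffices h : ∀ acc : List String,
      names.foldl (fun cov nm => if c nm then PySem.Set.add cov nm else cov) acc =
      (names.filter c).foldl PySem.Set.add acc by
    exact h []
  induction names with
  | nil => intro acc; rfl
  | cons nm names ih =>
    intro acc
    by_cases hc : c nm <;> simp [hc, ih]

-- ===== VERDICT (by name: the statement is the Claim_ definition above) =====
theorem compute_unique_prefixes_for_category_spec : Claim_equal_compute_unique_prefixes_for_category := by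
  intro cat names pref_to_cats _ _
  unfold Spec_compute_unique_prefixes_for_category
  unfold compute_unique_prefixes_for_category compute_unique_prefixes_for_category_alt
  have hcand := pv_candidates_eq cat (PySem.Dict.mk pref_to_cats) names
  have hkept : pvKeptA (pvCandidatesA cat (PySem.Dict.mk pref_to_cats) names) =
      pvKeptB (pvCandidatesB cat (PySem.Dict.mk pref_to_cats) names) := by
    rw [hcand]
    exact pv_kept_eq _ (pv_candidatesB_endsSep cat (PySem.Dict.mk pref_to_cats) names)
  simp only [hkept, pv_covered_eq]
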